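-- pv_equiv track=rewrite | github.com/arty-kk/kira | app/emo_engine/persona/ltm.py | _tag_literal
-- ===== SOURCE A (Python) =====
-- def _tag_literal(s: str) -> str:
--     s = (s or "")
--     s = (s.replace("\\", "\\\\")
--            .replace('"', r'\"')
--            .replace("|", r"\|")
--            .replace(",", r"\,")
--            .replace("{", r"\{")
--            .replace("}", r"\}")
--            .replace("\r", " ").replace("\n", " "))
--     needs_quotes = any(ch.isspace() for ch in s) or any(sym in s for sym in (",","|","{","}"))
--     return f'"{s}"' if needs_quotes else s
-- ===== SOURCE B (Python) =====
-- _ESC = {"\\": "\\\\", '"': '\\"', "|": "\\|", ",": "\\,", "{": "\\{", "}": "\\}", "\r": " ", "\n": " "}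
--
-- def _tag_literal(s: str) -> str:
--     out = []
--     needs_quotes = False
--     for ch in (s or ""):
--         out.append(_ESC.get(ch, ch))
--         if ch.isspace() or ch in ",|{}":
--             needs_quotes = True
--     res = "".join(out)
--     return f'"{res}"' if needs_quotes else res
-- ===== Notes on version B (the rewrite author's own statement) =====
-- stated objective: alternative
-- what changed: Replaced the eight chained str.replace passes plus two trailing any() scans over the escaped string with a single pass over the original string that looks each character up in an escape table and sets the quoting flag in the same loop; same asymptotic cost, and not faster in CPython where str.replace runs in C.
import Mathlib
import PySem

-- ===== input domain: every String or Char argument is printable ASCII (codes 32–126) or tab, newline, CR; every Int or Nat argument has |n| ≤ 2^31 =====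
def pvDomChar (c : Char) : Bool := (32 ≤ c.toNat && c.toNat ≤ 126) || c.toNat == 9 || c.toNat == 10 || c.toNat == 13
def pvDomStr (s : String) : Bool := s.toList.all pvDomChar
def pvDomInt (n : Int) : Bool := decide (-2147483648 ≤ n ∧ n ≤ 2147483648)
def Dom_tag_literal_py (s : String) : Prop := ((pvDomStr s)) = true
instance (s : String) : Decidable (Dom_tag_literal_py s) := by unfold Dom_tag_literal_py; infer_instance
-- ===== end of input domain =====

-- B replaces A's eight chained replace passes and two trailing scans by one pass with an
-- escape table that also sets the quoting flag in the same loop (objective: alternative).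

-- ===== PORT A =====
def tag_literal_py (s : String) : String :=
  let l0 := if s.toList = [] then [] else s.toList            -- s = (s or "")
  let l1 := PySem.Chars.replace l0 ['\\'] ['\\', '\\']
  let l2 := PySem.Chars.replace l1 ['"'] ['\\', '"']
  let l3 := PySem.Chars.replace l2 ['|'] ['\\', '|']
  let l4 := PySem.Chars.replace l3 [','] ['\\', ',']
  let l5 := PySem.Chars.replace l4 ['{'] ['\\', '{']
  let l6 := PySem.Chars.replace l5 ['}'] ['\\', '}']
  let l7 := PySem.Chars.replace l6 ['\r'] [' ']
  let l8 := PySem.Chars.replace l7 ['\n'] [' ']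
  let needs := l8.any PySem.Chars.isspace
      || ([[','], ['|'], ['{'], ['}']] : List (List Char)).any (fun sym => PySem.Chars.isIn sym l8)
  if needs then String.ofList ('"' :: l8 ++ ['"']) else String.ofList l8

-- ===== PORT B =====
-- the escape table _ESC, as a lookup function
def escB (c : Char) : List Char :=
  if c = '\\' then ['\\', '\\']
  else if c = '"' then ['\\', '"']
  else if c = '|' then ['\\', '|']
  else if c = ',' then ['\\', ',']
  else if c = '{' then ['\\', '{']
  else if c = '}' then ['\\', '}']
  else if c = '\r' then [' ']
  else if c = '\n' then [' ']
  else [c]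

def needsQB (c : Char) : Bool :=
  PySem.Chars.isspace c || (c == ',' || c == '|' || c == '{' || c == '}')

def tag_literal_py_alt (s : String) : String :=
  let l := if s.toList = [] then [] else s.toList             -- for ch in (s or "")
  let st := l.foldl (fun (acc : List Char × Bool) ch =>
      (acc.1 ++ escB ch, acc.2 || needsQB ch)) ([], false)
  if st.2 then String.ofList ('"' :: st.1 ++ ['"']) else String.ofList st.1

-- ===== PRECONDITION & SPEC =====
def Spec_tag_literal_py (s : String) (out : String) : Prop := out = tag_literal_py_alt s
instance (s : String) (out : String) : Decidable (Spec_tag_literal_py s out) := by unfold Spec_tag_literal_py; infer_instance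

-- ===== CLAIM (what is proved, stated in full; the proofs are below) =====
def Claim_equal_tag_literal_py : Prop := ∀ (s : String), Dom_tag_literal_py s → Spec_tag_literal_py s (tag_literal_py s)

-- ===== LEMMAS AND PROOFS =====

-- single-character pattern: replace is a per-character flatMap
theorem go_single (a : Char) (r : List Char) (l : List Char) : ∀ acc,
    PySem.Chars.replace.go [a] r l.length l acc
      = acc.reverse ++ l.flatMap (fun c => if c = a then r else [c]) := by
  induction l with
  | nil => intro acc; simp [PySem.Chars.replace.go]
  | cons c t ih =>
    intro acc
    rw [List.length_cons, PySem.Chars.replace.go]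
    by_cases h : c = a
    · subst h; simp [List.isPrefixOf, ih]
    · have hp : [a].isPrefixOf (c :: t) = false := by
        simp [List.isPrefixOf]; exact fun h' => h h'.symm
      simp [hp, ih, h]

theorem replace_single (a : Char) (r : List Char) (l : List Char) :
    PySem.Chars.replace l [a] r = l.flatMap (fun c => if c = a then r else [c]) := by
  rw [PySem.Chars.replace]
  simp [go_single]

-- the eight chained single-character substitutions compose to the escape table escB
theorem chain_eq_escB (l : List Char) :
    PySem.Chars.replace (PySem.Chars.replace (PySem.Chars.replace (PySem.Chars.replace
      (PySem.Chars.replace (PySem.Chars.replace (PySem.Chars.replace (PySem.Chars.replace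
        l ['\\'] ['\\', '\\']) ['"'] ['\\', '"']) ['|'] ['\\', '|']) [','] ['\\', ','])
        ['{'] ['\\', '{']) ['}'] ['\\', '}']) ['\r'] [' ']) ['\n'] [' ']
      = l.flatMap escB := by
  simp only [replace_single, List.flatMap_assoc]
  apply List.flatMap_congr  -- a per-character identity remains
  intro c _
  by_cases h1 : c = '\\'; · subst h1; rfl
  by_cases h2 : c = '"'; · subst h2; rfl
  by_cases h3 : c = '|'; · subst h3; rfl
  by_cases h4 : c = ','; · subst h4; rfl
  by_cases h5 : c = '{'; · subst h5; rfl
  by_cases h6 : c = '}'; · subst h6; rfl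
  by_cases h7 : c = '\r'; · subst h7; rfl
  by_cases h8 : c = '\n'; · subst h8; rfl
  simp [escB, h1, h2, h3, h4, h5, h6, h7, h8]

-- whitespace survives escaping exactly
theorem any_isspace_escB (c : Char) :
    (escB c).any PySem.Chars.isspace = PySem.Chars.isspace c := by
  by_cases h1 : c = '\\'; · subst h1; rfl
  by_cases h2 : c = '"'; · subst h2; rfl
  by_cases h3 : c = '|'; · subst h3; rfl
  by_cases h4 : c = ','; · subst h4; rfl
  by_cases h5 : c = '{'; · subst h5; rfl
  by_cases h6 : c = '}'; · subst h6; rfl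
  by_cases h7 : c = '\r'; · subst h7; rfl
  by_cases h8 : c = '\n'; · subst h8; rfl
  simp [escB, h1, h2, h3, h4, h5, h6, h7, h8]

-- a quoting symbol occurs in an escaped character iff it was that original character
theorem mem_escB (a c : Char) (ha : a = ',' ∨ a = '|' ∨ a = '{' ∨ a = '}') :
    a ∈ escB c ↔ c = a := by
  rcases ha with h | h | h | h <;> subst h <;>
    (by_cases h1 : c = '\\'; · subst h1; decide
     by_cases h2 : c = '"'; · subst h2; decide
     by_cases h3 : c = '|'; · subst h3; decide
     by_cases h4 : c = ','; · subst h4; decide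
     by_cases h5 : c = '{'; · subst h5; decide
     by_cases h6 : c = '}'; · subst h6; decide
     by_cases h7 : c = '\r'; · subst h7; decide
     by_cases h8 : c = '\n'; · subst h8; decide
     simp only [escB, if_neg h1, if_neg h2, if_neg h3, if_neg h4, if_neg h5, if_neg h6,
       if_neg h7, if_neg h8, List.mem_singleton]
     exact eq_comm)

-- B's loop computes the escaped string and the quoting flag
theorem foldl_B (l : List Char) : ∀ (as : List Char) (b : Bool),
    l.foldl (fun (acc : List Char × Bool) ch => (acc.1 ++ escB ch, acc.2 || needsQB ch)) (as, b)
      = (as ++ l.flatMap escB, b || l.any needsQB) := by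
  induction l with
  | nil => intro as b; simp
  | cons c t ih => intro as b; simp [ih, Bool.or_assoc]

-- any distributes over a pointwise disjunction
theorem any_orB (l : List Char) (p q : Char → Bool) :
    l.any (fun c => p c || q c) = (l.any p || l.any q) := by
  induction l with
  | nil => rfl
  | cons c t ih =>
    simp only [List.any_cons, ih]
    cases p c <;> cases q c <;> cases t.any p <;> cases t.any q <;> rfl

-- A's quoting test, read off the escaped string, is B's per-character test
theorem needs_eq (l : List Char) :
    ((l.flatMap escB).any PySem.Chars.isspace
      || ([[','], ['|'], ['{'], ['}']] : List (List Char)).any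
           (fun sym => PySem.Chars.isIn sym (l.flatMap escB)))
      = l.any needsQB := by
  have hmem : ∀ a, (a = ',' ∨ a = '|' ∨ a = '{' ∨ a = '}') →
      (PySem.Chars.isIn [a] (l.flatMap escB) = l.any (fun c => c == a)) := by
    intro a ha
    rw [Bool.eq_iff_iff, PySem.Chars.isIn_iff_infix, List.singleton_infix_iff,
        List.mem_flatMap, List.any_eq_true]
    constructor
    · rintro ⟨c, hc, hm⟩; exact ⟨c, hc, by simpa using (mem_escB a c ha).mp hm⟩
    · rintro ⟨c, hc, hm⟩; exact ⟨c, hc, (mem_escB a c ha).mpr (by simpa using hm)⟩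
  have hB : l.any needsQB
      = (l.any PySem.Chars.isspace
          || (((l.any (fun c => c == ',') || l.any (fun c => c == '|'))
                || l.any (fun c => c == '{')) || l.any (fun c => c == '}'))) := by
    show l.any (fun c => PySem.Chars.isspace c
        || (c == ',' || c == '|' || c == '{' || c == '}')) = _
    rw [any_orB, any_orB, any_orB, any_orB]
  rw [hB]
  simp only [List.any_cons, List.any_nil, Bool.or_false,
    hmem ',' (by simp), hmem '|' (by simp), hmem '{' (by simp), hmem '}' (by simp),
    List.any_flatMap, any_isspace_escB]
  cases l.any PySem.Chars.isspace <;> cases l.any (fun c => c == ',') <;>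
    cases l.any (fun c => c == '|') <;> cases l.any (fun c => c == '{') <;>
    cases l.any (fun c => c == '}') <;> rfl

-- ===== VERDICT (by name: the statement is the Claim_ definition above) =====
theorem tag_literal_py_spec : Claim_equal_tag_literal_py := by
  intro s _
  unfold Spec_tag_literal_py
  simp only [tag_literal_py, tag_literal_py_alt]
  rw [chain_eq_escB, foldl_B, needs_eq]
  simp [Bool.false_or, List.nil_append]
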